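-- pv_equiv track=rewrite | github.com/dbsrlskfdk/AI_Tech_NLP | Algorithm/Week3/Num 5/Hwimin.py | f
-- ===== SOURCE A (Python) =====
-- def f(string):
--     #1번 조건
--     if not [word for word in string if word in ['a','e','i','o','u']]:
--         return False
--
--     #2번 조건
--     cnt1=0
--     cnt2=0
--     for word in string:
--         if word in ['a','e','i','o','u']:
--             cnt1=0
--             cnt2+=1
--         else:
--             cnt1+=1
--             cnt2=0
--         if cnt1==3 or cnt2==3:
--             return False
--
--     #3번 조건
--     stack=[]
--     for word in string:
--         if stack and word!='e' and word!='o':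
--             if stack.pop() == word:
--                 return False
--         stack.append(word)
--     return True
-- ===== SOURCE B (Python) =====
-- def f(string):
--     has_vowel = False
--     vrun = 0
--     crun = 0
--     prev = None
--     for c in string:
--         if c in 'aeiou':
--             has_vowel = True
--             vrun += 1
--             crun = 0
--         else:
--             crun += 1
--             vrun = 0
--         if vrun == 3 or crun == 3:
--             return False
--         if prev == c and c != 'e' and c != 'o':
--             return False
--         prev = c
--     return has_vowel
-- ===== Notes on version B (the rewrite author's own statement) =====
-- stated objective: simpler
-- what changed: Replaces A's three separate passes (vowel-filter comprehension, run-counter loop, stack-based adjacency loop) with one single pass maintaining a has-vowel flag, two run counters and the previous character as scalar state.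
import Mathlib
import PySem

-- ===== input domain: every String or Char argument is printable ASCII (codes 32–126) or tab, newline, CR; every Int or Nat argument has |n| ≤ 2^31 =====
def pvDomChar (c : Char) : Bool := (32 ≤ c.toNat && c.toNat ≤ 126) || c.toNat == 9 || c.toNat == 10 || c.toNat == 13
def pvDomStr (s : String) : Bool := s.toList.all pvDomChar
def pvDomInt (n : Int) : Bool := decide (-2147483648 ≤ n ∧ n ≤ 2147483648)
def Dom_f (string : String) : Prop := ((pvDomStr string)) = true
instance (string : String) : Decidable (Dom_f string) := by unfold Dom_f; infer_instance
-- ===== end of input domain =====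

-- B replaces A's three separate passes (vowel filter, run-length loop, stack-based adjacency loop)
-- by one single pass over scalar state (vowel flag, two run counters, previous char): simpler.


-- ===== PORT A =====
-- word in ['a','e','i','o','u']
def fVowelA (w : Char) : Bool := ['a','e','i','o','u'].contains w

-- #2: loop keeping consonant counter cnt1 and vowel counter cnt2; false = early `return False`
def fLoop2 : List Char → Int → Int → Bool
  | [], _, _ => true
  | w :: rest, cnt1, cnt2 =>
    let (cnt1, cnt2) := if fVowelA w then ((0 : Int), cnt2 + 1) else (cnt1 + 1, (0 : Int))
    if cnt1 = 3 || cnt2 = 3 then false else fLoop2 rest cnt1 cnt2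

-- #3: stack with head = top (append = push on head, pop = take head); false = early `return False`
def fLoop3 : List Char → List Char → Bool
  | [], _ => true
  | w :: rest, stack =>
    if !stack.isEmpty && w ≠ 'e' && w ≠ 'o' then
      match stack with
      | t :: s => if t = w then false else fLoop3 rest (w :: s)
      | [] => fLoop3 rest [w]   -- unreachable: stack nonempty in this branch
    else fLoop3 rest (w :: stack)

def f (string : String) : Bool :=
  -- #1: `if not [word for word in string if word in [...]]: return False`
  if (string.toList.filter fVowelA).isEmpty then false
  else if fLoop2 string.toList 0 0 = false then false
  else fLoop3 string.toList []

-- ===== PORT B =====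
-- c in 'aeiou' (single char: membership)
def fVowelB (c : Char) : Bool := "aeiou".toList.contains c

-- single pass: vowel run, consonant run, previous char, has-vowel flag
def fLoopB : List Char → Int → Int → Option Char → Bool → Bool
  | [], _, _, _, hv => hv
  | c :: rest, vrun, crun, prev, hv =>
    let (hv, vrun, crun) :=
      if fVowelB c then (true, vrun + 1, (0 : Int)) else (hv, (0 : Int), crun + 1)
    if vrun = 3 || crun = 3 then false
    else if prev = some c && c ≠ 'e' && c ≠ 'o' then false
    else fLoopB rest vrun crun (some c) hv

def f_alt (string : String) : Bool :=
  fLoopB string.toList 0 0 none false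

-- ===== PRECONDITION & SPEC =====
def Spec_f (string : String) (out : Bool) : Prop := out = f_alt string
instance (string : String) (out : Bool) : Decidable (Spec_f string out) := by unfold Spec_f; infer_instance

-- ===== CLAIM (what is proved, stated in full; the proofs are below) =====
def Claim_equal_f : Prop := ∀ (string : String), Dom_f string → Spec_f string (f string)

-- ===== LEMMAS AND PROOFS =====

-- prev-based adjacency check (the meaning of A's stack loop and of B's prev component)
def fAdj : List Char → Option Char → Bool
  | [], _ => true
  | c :: rest, prev =>
    if prev = some c && c ≠ 'e' && c ≠ 'o' then false else fAdj rest (some c)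

theorem vowelB_eq (c : Char) : fVowelB c = fVowelA c := by
  simp [fVowelB, fVowelA]

theorem loop3_eq_adj (l : List Char) : ∀ stack,
    fLoop3 l stack = fAdj l (stack.head?) := by
  induction l with
  | nil => intro stack; rfl
  | cons w rest ih =>
    intro stack
    cases stack with
    | nil => simp [fLoop3, fAdj, ih]
    | cons t s =>
      by_cases he : w = 'e'
      · simp [fLoop3, fAdj, he, ih]
      · by_cases ho : w = 'o'
        · simp [fLoop3, fAdj, ho, ih]
        · by_cases htw : t = w
          · simp [fLoop3, fAdj, he, ho, htw]
          · simp [fLoop3, fAdj, he, ho, htw, ih]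

theorem filter_isEmpty_any (l : List Char) :
    (l.filter fVowelA).isEmpty = !l.any fVowelA := by
  induction l with
  | nil => rfl
  | cons c rest ih =>
    by_cases h : fVowelA c = true <;> simp [List.filter, List.any, h, ih]

theorem loopB_split (l : List Char) : ∀ (vr cr : Int) (p : Option Char) (hv : Bool),
    fLoopB l vr cr p hv = ((hv || l.any fVowelA) && fLoop2 l cr vr && fAdj l p) := by
  induction l with
  | nil => intro vr cr p hv; simp [fLoopB, fLoop2, fAdj]
  | cons c rest ih =>
    intro vr cr p hv
    by_cases hc : fVowelA c = true
    · by_cases h3 : vr + 1 = 3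
      · simp [fLoopB, fLoop2, vowelB_eq, hc, h3]
      · by_cases hp : (p = some c && c ≠ 'e' && c ≠ 'o') = true
        · simp only [Bool.and_eq_true, decide_eq_true_eq] at hp
          obtain ⟨⟨hps, hpe⟩, hpo⟩ := hp
          simp [fLoopB, fLoop2, fAdj, vowelB_eq, hc, h3, hps, hpe, hpo]
        · simp [fLoopB, fLoop2, fAdj, vowelB_eq, hc, h3, ih]
          simp [Bool.or_assoc, Bool.and_assoc, Bool.and_comm]
    · by_cases h3 : cr + 1 = 3
      · simp [fLoopB, fLoop2, vowelB_eq, hc, h3]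
      · by_cases hp : (p = some c && c ≠ 'e' && c ≠ 'o') = true
        · simp only [Bool.and_eq_true, decide_eq_true_eq] at hp
          obtain ⟨⟨hps, hpe⟩, hpo⟩ := hp
          simp [fLoopB, fLoop2, fAdj, vowelB_eq, hc, h3, hps, hpe, hpo]
        · simp [fLoopB, fLoop2, fAdj, vowelB_eq, hc, h3, ih]
          simp [Bool.or_assoc, Bool.and_assoc, Bool.and_comm]

-- ===== VERDICT (by name: the statement is the Claim_ definition above) =====
theorem f_spec : Claim_equal_f := by
  intro s _
  unfold Spec_f f f_alt
  rw [loopB_split, filter_isEmpty_any, loop3_eq_adj]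
  cases h1 : s.toList.any fVowelA <;>
    cases h2 : fLoop2 s.toList 0 0 <;>
      simp
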